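-- pv_equiv track=rewrite | github.com/spapas/aoc15 | day19.py | get_reverse_replacements_for_str
-- ===== SOURCE A (Python) =====
-- def find(substring: str, string: str, idx: int=0) -> int:
--     try:
--         return string.index(substring, idx)
--     except ValueError:
--         return -1
--
-- def get_reverse_replacements_for_str(replacements, mol):
--     candidates = set([])
--     for r in replacements:
--         f = r[1]
--         t = r[0]
--         i = find(f, mol)
--         while(i>=0):
--             new_i = i+len(f)
--             new_mol = mol[:i] + t + mol[new_i:]
--             candidates.add(new_mol)
--             i = find(f, mol, new_i)
--     return candidates
-- ===== SOURCE B (Python) =====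
-- def get_reverse_replacements_for_str(replacements, mol):
--     candidates = set()
--     for t, f in replacements:
--         parts = mol.split(f)
--         for k in range(len(parts) - 1):
--             candidates.add(f.join(parts[:k+1]) + t + f.join(parts[k+1:]))
--     return candidates
-- ===== Notes on version B (the rewrite author's own statement) =====
-- stated objective: alternative
-- what changed: B splits the molecule once per replacement into its segments (mol.split(f)) and reassembles each candidate by joining the segments around one boundary, instead of A's repeated index-search with slicing of the whole molecule.
-- outside the precondition, e.g. on get_reverse_replacements_for_str([('H', '')], 'ab'): A does not finish within the time limit, B raises ValueError
import Mathlib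
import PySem

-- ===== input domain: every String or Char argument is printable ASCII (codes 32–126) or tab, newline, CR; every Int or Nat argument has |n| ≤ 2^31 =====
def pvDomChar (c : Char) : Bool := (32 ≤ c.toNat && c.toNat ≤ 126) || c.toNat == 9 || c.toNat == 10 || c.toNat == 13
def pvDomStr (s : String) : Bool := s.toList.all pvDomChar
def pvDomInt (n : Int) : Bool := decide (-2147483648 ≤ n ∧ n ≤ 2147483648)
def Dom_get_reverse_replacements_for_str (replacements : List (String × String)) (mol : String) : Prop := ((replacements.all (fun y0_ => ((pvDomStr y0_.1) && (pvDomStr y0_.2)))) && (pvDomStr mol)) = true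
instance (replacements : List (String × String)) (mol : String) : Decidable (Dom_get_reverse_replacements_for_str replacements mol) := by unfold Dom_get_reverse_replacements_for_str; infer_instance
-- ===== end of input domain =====

-- B rebuilds each candidate from the segment list mol.split(f) instead of A's repeated index/slice scan
-- over the molecule; objective: alternative (different decomposition, same return value).

-- ===== PORT A =====
-- Python helper find(substring, string, idx): string.index(substring, idx), ValueError -> -1 (= str.find)
def pvFind (substring : String) (string : String) (idx : Int) : Int :=
  PySem.Str.findFrom string substring idx none

-- the inner 'while i >= 0' loop of A; fuel mol.length+1 only makes the loop total: each iteration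
-- advances the search start by len(f) ≥ 1, so the fuel is never exhausted under Pre_ (f ≠ "")
def pvALoop (f t mol : String) (fuel : Nat) (i : Int) (candidates : PySem.Set String) : PySem.Set String :=
  match fuel with
  | 0 => candidates
  | fuel + 1 =>
    if i ≥ 0 then
      let new_i := i + PySem.Str.len f
      let new_mol := String.ofList (PySem.List.slice mol.toList none (some i) ++ t.toList ++ PySem.List.slice mol.toList (some new_i) none)
      pvALoop f t mol fuel (pvFind f mol new_i) (PySem.Set.add candidates new_mol)
    else candidates

def get_reverse_replacements_for_str (replacements : List (String × String)) (mol : String) : List String :=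
  replacements.foldl (fun candidates r =>
    let f := r.2
    let t := r.1
    pvALoop f t mol (mol.toList.length + 1) (pvFind f mol 0) candidates) PySem.Set.empty

-- ===== PORT B =====
-- one replacement (t, f): parts = mol.split(f); for k in range(len(parts)-1):
--   candidates.add(f.join(parts[:k+1]) + t + f.join(parts[k+1:]))
def pvBInner (t f mol : String) (candidates : PySem.Set String) : PySem.Set String :=
  let parts := PySem.Chars.splitOn mol.toList f.toList
  (PySem.List.pyRange 0 ((parts.length : Int) - 1) 1).foldl (fun cand k =>
    PySem.Set.add cand (String.ofList
      (PySem.Chars.join f.toList (PySem.List.slice parts none (some (k + 1)))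
        ++ t.toList
        ++ PySem.Chars.join f.toList (PySem.List.slice parts (some (k + 1)) none)))) candidates

def get_reverse_replacements_for_str_alt (replacements : List (String × String)) (mol : String) : List String :=
  replacements.foldl (fun candidates r => pvBInner r.1 r.2 mol candidates) PySem.Set.empty

-- ===== PRECONDITION & SPEC =====
-- Pre_ excludes replacements with an empty pattern r[1] = "": there Python A never terminates
-- (string.index("", i) = i forever) and Python B raises ValueError from str.split("").
def Pre_get_reverse_replacements_for_str (replacements : List (String × String)) (mol : String) : Prop :=
  ∀ r ∈ replacements, r.2 ≠ ""
instance (replacements : List (String × String)) (mol : String) : Decidable (Pre_get_reverse_replacements_for_str replacements mol) := by unfold Pre_get_reverse_replacements_for_str; infer_instance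

def pvWitness_get_reverse_replacements_for_str : (List (String × String)) × String := ([("e", "H"), ("HO", "ll")], "Hello")

def Spec_get_reverse_replacements_for_str (replacements : List (String × String)) (mol : String) (out : List String) : Prop := out = get_reverse_replacements_for_str_alt replacements mol
instance (replacements : List (String × String)) (mol : String) (out : List String) : Decidable (Spec_get_reverse_replacements_for_str replacements mol out) := by unfold Spec_get_reverse_replacements_for_str; infer_instance

-- ===== CLAIM (what is proved, stated in full; the proofs are below) =====
def Claim_equal_get_reverse_replacements_for_str : Prop := ∀ (replacements : List (String × String)) (mol : String), Dom_get_reverse_replacements_for_str replacements mol → Pre_get_reverse_replacements_for_str replacements mol → Spec_get_reverse_replacements_for_str replacements mol (get_reverse_replacements_for_str replacements mol)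

-- ===== LEMMAS AND PROOFS =====

def pvSplit (f s : List Char) : List (List Char) :=
  if h : f = [] ∨ PySem.Chars.find s f = -1 then [s]
  else
    (s.take (PySem.Chars.find s f).toNat)
      :: pvSplit f (s.drop ((PySem.Chars.find s f).toNat + f.length))
termination_by s.length
decreasing_by
  push_neg at h
  have h1 : f <:+: s := (PySem.Chars.find_eq_neg_one_iff s f).not_left.mp h.2
  have h2 : 1 ≤ f.length := List.length_pos_iff.mpr h.1
  have h3 : f.length ≤ s.length := h1.length_le
  simp only [List.length_drop]
  omega

def pvAL (f t s : List Char) : List (List Char) :=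
  if h : f = [] ∨ PySem.Chars.find s f = -1 then []
  else
    (s.take (PySem.Chars.find s f).toNat ++ t ++ s.drop ((PySem.Chars.find s f).toNat + f.length))
      :: (pvAL f t (s.drop ((PySem.Chars.find s f).toNat + f.length))).map
           (fun c => s.take (PySem.Chars.find s f).toNat ++ f ++ c)
termination_by s.length
decreasing_by
  push_neg at h
  have h1 : f <:+: s := (PySem.Chars.find_eq_neg_one_iff s f).not_left.mp h.2
  have h2 : 1 ≤ f.length := List.length_pos_iff.mpr h.1
  have h3 : f.length ≤ s.length := h1.length_le
  simp only [List.length_drop]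
  omega

theorem pvFind_char (s f : List Char) (h : PySem.Chars.find s f ≠ -1) :
    f <+: s.drop (PySem.Chars.find s f).toNat ∧
      ∀ j < (PySem.Chars.find s f).toNat, ¬ f <+: s.drop j := by
  have := PySem.Chars.findFrom_natCast_spec s f 0 (Nat.zero_le _)
  simp only [Nat.cast_zero, PySem.Chars.findFrom_zero] at this
  have h2 := this h
  exact ⟨h2.2.1, fun j hj => h2.2.2 j (Nat.zero_le _) hj⟩

theorem pvFind_unique (s f : List Char) (n : Nat)
    (h1 : f <+: s.drop n) (h2 : ∀ j < n, ¬ f <+: s.drop j) :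
    PySem.Chars.find s f = (n : Int) := by
  have hne : PySem.Chars.find s f ≠ -1 := by
    rw [ne_eq, PySem.Chars.find_eq_neg_one_iff, not_not]
    exact ((PySem.Chars.exists_prefix_drop_iff_isIn f s).mp ⟨n, h1⟩) |> (PySem.Chars.isIn_iff_infix f s).mp
  have hc := pvFind_char s f hne
  have hnn : 0 ≤ PySem.Chars.find s f := by
    rcases (PySem.Chars.neg_one_le_find s f).lt_or_eq with h | h
    · omega
    · omega
  by_contra hne2
  rcases Nat.lt_trichotomy (PySem.Chars.find s f).toNat n with h | h | h
  · exact h2 _ h hc.1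
  · omega
  · exact hc.2 n h h1

theorem pvSplit_at (s f : List Char) (h : PySem.Chars.find s f ≠ -1) :
    s = s.take (PySem.Chars.find s f).toNat ++ f
          ++ s.drop ((PySem.Chars.find s f).toNat + f.length) := by
  obtain ⟨hpre, -⟩ := pvFind_char s f h
  obtain ⟨t, ht⟩ := hpre
  have ht2 : s.drop ((PySem.Chars.find s f).toNat + f.length) = t := by
    have : (s.drop (PySem.Chars.find s f).toNat).drop f.length = t := by
      rw [← ht, List.drop_left]
    rw [← this, List.drop_drop, Nat.add_comm]
  conv_lhs => rw [← List.take_append_drop (PySem.Chars.find s f).toNat s, ← ht]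
  rw [ht2, List.append_assoc]

theorem pvSplit_ne_nil (f s : List Char) : pvSplit f s ≠ [] := by
  unfold pvSplit
  split <;> simp

theorem pvSplit_intercalate (f s : List Char) (hf : f ≠ []) :
    List.intercalate f (pvSplit f s) = s := by
  induction s using pvSplit.induct f with
  | case1 s h =>
    rw [pvSplit, dif_pos h]
    simp [List.intercalate]
  | case2 s h ih =>
    rw [pvSplit, dif_neg h]
    have hne := pvSplit_ne_nil f (s.drop ((PySem.Chars.find s f).toNat + f.length))
    obtain ⟨b, tl, hb⟩ := List.exists_cons_of_ne_nil hne
    rw [hb]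
    have hstep : List.intercalate f (s.take (PySem.Chars.find s f).toNat :: b :: tl)
        = s.take (PySem.Chars.find s f).toNat ++ f ++ List.intercalate f (b :: tl) := by
      simp [List.intercalate, List.intersperse]
    rw [hstep, ← hb, ih]
    push_neg at h
    conv_rhs => rw [pvSplit_at s f h.2]

theorem pvFind_prefix (l f : List Char) (hp : f.isPrefixOf l = true) :
    PySem.Chars.find l f = 0 := by
  have := pvFind_unique l f 0 (by simpa using List.isPrefixOf_iff_prefix.mp hp) (by omega)
  simpa using this

theorem pvFind_cons (c : Char) (rest f : List Char) (hp : ¬ f.isPrefixOf (c :: rest) = true) :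
    PySem.Chars.find (c :: rest) f
      = if PySem.Chars.find rest f = -1 then -1 else PySem.Chars.find rest f + 1 := by
  have hnp : ¬ f <+: (c :: rest) := fun h => hp (List.isPrefixOf_iff_prefix.mpr h)
  by_cases hm : PySem.Chars.find rest f = -1
  · rw [if_pos hm]
    rw [PySem.Chars.find_eq_neg_one_iff] at hm ⊢
    intro hinf
    rcases List.infix_cons_iff.mp hinf with h | h
    · exact hnp h
    · exact hm h
  · rw [if_neg hm]
    obtain ⟨h1, h2⟩ := pvFind_char rest f hm
    have hnn : 0 ≤ PySem.Chars.find rest f := by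
      have := PySem.Chars.neg_one_le_find rest f; omega
    set m := (PySem.Chars.find rest f).toNat with hmdef
    have : PySem.Chars.find (c :: rest) f = ((m + 1 : Nat) : Int) := by
      apply pvFind_unique
      · simpa using h1
      · intro j hj
        match j with
        | 0 => simpa using hnp
        | j + 1 =>
          have := h2 j (by omega)
          simpa using this
    rw [this]; omega

theorem pvSplit_nil (f : List Char) (hf : f ≠ []) : pvSplit f [] = [[]] := by
  rw [pvSplit, dif_pos]
  right
  rw [PySem.Chars.find_eq_neg_one_iff, List.infix_nil]
  exact hf

theorem pvGo_eq (f : List Char) (hf : f ≠ []) :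
    ∀ (fuel : Nat) (l cur : List Char) (acc : List (List Char)), l.length < fuel →
    PySem.Chars.splitOn.go f fuel l cur acc
      = acc.reverse ++ List.modifyHead (fun x => cur.reverse ++ x) (pvSplit f l) := by
  intro fuel
  induction fuel with
  | zero => intro l cur acc h; omega
  | succ fuel ih =>
    intro l cur acc h
    match l with
    | [] =>
      rw [PySem.Chars.splitOn.go.eq_def]
      simp [pvSplit_nil f hf]
    | c :: rest =>
      rw [PySem.Chars.splitOn.go.eq_def]
      simp only []
      by_cases hp : f.isPrefixOf (c :: rest) = true
      · rw [if_pos hp]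
        have hfl : 1 ≤ f.length := List.length_pos_iff.mpr hf
        have hlen : (List.drop f.length (c :: rest)).length < fuel := by
          simp only [List.length_drop, List.length_cons] at h ⊢; omega
        rw [ih _ _ _ hlen]
        have h0 : PySem.Chars.find (c :: rest) f = 0 := pvFind_prefix _ _ hp
        have hsplit : pvSplit f (c :: rest)
            = [] :: pvSplit f (List.drop f.length (c :: rest)) := by
          rw [pvSplit, dif_neg (by simp [hf, h0])]
          simp [h0]
        rw [hsplit]
        obtain ⟨b, tl, hb⟩ := List.exists_cons_of_ne_nil (pvSplit_ne_nil f (List.drop f.length (c :: rest)))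
        rw [hb]
        simp
      · rw [if_neg hp]
        have hlen : rest.length < fuel := by simp at h; omega
        rw [ih _ _ _ hlen]
        have hfc := pvFind_cons c rest f hp
        by_cases hm : PySem.Chars.find rest f = -1
        · have hsplit1 : pvSplit f rest = [rest] := by rw [pvSplit, dif_pos (Or.inr hm)]
          have hsplit2 : pvSplit f (c :: rest) = [c :: rest] := by
            rw [pvSplit, dif_pos (Or.inr (by rw [hfc, if_pos hm]))]
          rw [hsplit1, hsplit2]
          simp
        · have hnn : 0 ≤ PySem.Chars.find rest f := by
            have := PySem.Chars.neg_one_le_find rest f; omega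
          have hfc2 : PySem.Chars.find (c :: rest) f = PySem.Chars.find rest f + 1 := by
            rw [hfc, if_neg hm]
          have htn : (PySem.Chars.find (c :: rest) f).toNat = (PySem.Chars.find rest f).toNat + 1 := by
            rw [hfc2]; omega
          have hsplit1 : pvSplit f rest
              = rest.take (PySem.Chars.find rest f).toNat
                :: pvSplit f (rest.drop ((PySem.Chars.find rest f).toNat + f.length)) := by
            rw [pvSplit, dif_neg (by simp [hf, hm])]
          have hsplit2 : pvSplit f (c :: rest)
              = (c :: rest.take (PySem.Chars.find rest f).toNat)
                :: pvSplit f (rest.drop ((PySem.Chars.find rest f).toNat + f.length)) := by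
            rw [pvSplit, dif_neg (by simp [hf, hfc2]; omega)]
            rw [htn]
            simp [List.take_succ_cons, List.drop_succ_cons, Nat.add_right_comm]
          rw [hsplit1, hsplit2]
          simp

theorem pvSplitOn_eq (f s : List Char) (hf : f ≠ []) :
    PySem.Chars.splitOn s f = pvSplit f s := by
  rw [PySem.Chars.splitOn, pvGo_eq f hf (s.length + 1) s [] [] (by omega)]
  obtain ⟨b, tl, hb⟩ := List.exists_cons_of_ne_nil (pvSplit_ne_nil f s)
  rw [hb]
  simp

theorem pvIntercalate_cons (f b : List Char) (tl : List (List Char)) (h : tl ≠ []) :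
    List.intercalate f (b :: tl) = b ++ f ++ List.intercalate f tl := by
  obtain ⟨c, tl2, hc⟩ := List.exists_cons_of_ne_nil h
  rw [hc]
  simp [List.intercalate, List.intersperse]

theorem pvAL_eq_B (f t s : List Char) (hf : f ≠ []) :
    pvAL f t s =
      (List.range ((pvSplit f s).length - 1)).map (fun k =>
        List.intercalate f ((pvSplit f s).take (k + 1)) ++ t
          ++ List.intercalate f ((pvSplit f s).drop (k + 1))) := by
  induction s using pvSplit.induct f with
  | case1 s h =>
    rw [pvAL, dif_pos h, pvSplit, dif_pos h]
    simp
  | case2 s h ih =>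
    rw [pvAL, dif_neg h]
    set i := (PySem.Chars.find s f).toNat with hi
    set s2 := s.drop (i + f.length) with hs2
    have hsplit : pvSplit f s = s.take i :: pvSplit f s2 := by
      rw [pvSplit, dif_neg h]
    obtain ⟨b, tl, hb⟩ := List.exists_cons_of_ne_nil (pvSplit_ne_nil f s2)
    have hlen : (pvSplit f s).length - 1 = (pvSplit f s2).length := by
      rw [hsplit]; simp
    rw [hlen, hsplit]
    have hlen2 : (pvSplit f s2).length = ((pvSplit f s2).length - 1) + 1 := by
      rw [hb]; simp
    rw [hlen2, List.range_succ_eq_map, List.map_cons]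
    push_neg at h
    congr 1
    · -- head
      simp only [List.take_succ_cons, List.take_zero, List.drop_succ_cons, List.drop_zero]
      rw [pvSplit_intercalate f s2 hf]
      simp [List.intercalate]
    · -- tail
      rw [ih]
      simp only [List.map_map]
      apply List.map_congr_left
      intro k hk
      simp only [Function.comp_apply, Nat.succ_eq_add_one]
      have htake : (s.take i :: pvSplit f s2).take (k + 1 + 1) = s.take i :: (pvSplit f s2).take (k + 1) := by
        simp [List.take_succ_cons]
      have hdrop : (s.take i :: pvSplit f s2).drop (k + 1 + 1) = (pvSplit f s2).drop (k + 1) := by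
        simp [List.drop_succ_cons]
      rw [htake, hdrop]
      have htne : (pvSplit f s2).take (k + 1) ≠ [] := by
        rw [hb]; simp [List.take_succ_cons]
      rw [pvIntercalate_cons f (s.take i) ((pvSplit f s2).take (k + 1)) htne]
      simp [List.append_assoc]

theorem pvALoop_eq (f t mol : String) (hf : f.toList ≠ []) :
    ∀ (fuel : Nat) (p s : List Char) (cand : PySem.Set String),
      mol.toList = p ++ s → s.length < fuel →
      pvALoop f t mol fuel (PySem.Str.findFrom mol f (p.length : Int) none) cand
        = (pvAL f.toList t.toList s).foldl
            (fun c x => PySem.Set.add c (String.ofList (p ++ x))) cand := by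
  intro fuel
  induction fuel with
  | zero => intro p s cand hmol hlen; omega
  | succ fuel ih =>
    intro p s cand hmol hlen
    have hple : p.length ≤ mol.toList.length := by rw [hmol]; simp
    have hdrop : mol.toList.drop p.length = s := by rw [hmol]; exact List.drop_left
    have hff : PySem.Str.findFrom mol f (p.length : Int) none
        = if PySem.Chars.find s f.toList = -1 then -1
          else (p.length : Int) + PySem.Chars.find s f.toList := by
      rw [PySem.Str.findFrom_eq, PySem.Chars.findFrom_natCast mol.toList f.toList p.length hple, hdrop]
    by_cases hm : PySem.Chars.find s f.toList = -1
    · rw [hff, if_pos hm, pvALoop]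
      rw [if_neg (by omega)]
      rw [pvAL, dif_pos (Or.inr hm)]
      rfl
    · have hnn : 0 ≤ PySem.Chars.find s f.toList := by
        have := PySem.Chars.neg_one_le_find s f.toList; omega
      set m := (PySem.Chars.find s f.toList).toNat with hmdef
      have hmle : m ≤ s.length := by
        have := PySem.Chars.find_le_length s f.toList; omega
      have hsp := pvSplit_at s f.toList hm
      have hmfl : m + f.toList.length ≤ s.length := by
        conv_rhs => rw [hsp]
        simp only [List.length_append, List.length_take]
        omega
      rw [hff, if_neg hm, pvALoop]
      rw [if_pos (by omega)]
      simp only []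
      have hni : ((p.length : Int) + PySem.Chars.find s f.toList) + PySem.Str.len f
          = ((p.length + m + f.toList.length : Nat) : Int) := by
        rw [PySem.Str.len_eq]; push_cast; omega
      have hi : ((p.length : Int) + PySem.Chars.find s f.toList) = ((p.length + m : Nat) : Int) := by
        push_cast; omega
      rw [hni, hi]
      have htake : (List.take (p.length + m) mol.toList) = p ++ s.take m := by
        rw [hmol, List.take_append]
        simp [List.take_of_length_le]
      have hdrop2 : (List.drop (p.length + m + f.toList.length) mol.toList) = s.drop (m + f.toList.length) := by
        rw [hmol, List.drop_append, List.drop_of_length_le (by omega)]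
        have h9 : p.length + m + f.toList.length - p.length = m + f.toList.length := by omega
        rw [h9, List.nil_append]
      have hcand : PySem.List.slice mol.toList none (some ((p.length + m : Nat) : Int))
            ++ t.toList
            ++ PySem.List.slice mol.toList (some ((p.length + m + f.toList.length : Nat) : Int)) none
          = p ++ (s.take m ++ t.toList ++ s.drop (m + f.toList.length)) := by
        rw [PySem.List.slice_to mol.toList (by positivity), PySem.List.slice_from mol.toList (by positivity)]
        rw [Int.toNat_natCast, Int.toNat_natCast, htake, hdrop2]
        simp [List.append_assoc]
      rw [hcand]
      set p2 := p ++ s.take m ++ f.toList with hp2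
      have hp2len : p2.length = p.length + m + f.toList.length := by
        simp [hp2, List.length_take]
        omega
      have hmol2 : mol.toList = p2 ++ s.drop (m + f.toList.length) := by
        rw [hmol, hp2]
        conv_lhs => rw [hsp]
        simp [List.append_assoc, ← hmdef]
      have hfind2 : pvFind f mol ((p.length + m + f.toList.length : Nat) : Int)
          = PySem.Str.findFrom mol f ((p2.length : Nat) : Int) none := by
        rw [pvFind, hp2len]
      have hlen2 : (s.drop (m + f.toList.length)).length < fuel := by
        have hfl : 1 ≤ f.toList.length := List.length_pos_iff.mpr hf
        simp only [List.length_drop]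
        omega
      rw [hfind2, ih p2 (s.drop (m + f.toList.length)) _ hmol2 hlen2]
      conv_rhs => rw [pvAL, dif_neg (not_or.mpr ⟨hf, hm⟩)]
      conv_rhs => rw [List.foldl_cons, List.foldl_map]
      congr 1
      funext c x
      rw [hp2]
      simp [List.append_assoc, ← hmdef]

theorem pvBInner_eq (t f mol : String) (hf : f.toList ≠ []) (cand : PySem.Set String) :
    pvBInner t f mol cand
      = (pvAL f.toList t.toList mol.toList).foldl
          (fun c x => PySem.Set.add c (String.ofList x)) cand := by
  simp only [pvBInner]
  set parts := PySem.Chars.splitOn mol.toList f.toList with hparts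
  have hpv : parts = pvSplit f.toList mol.toList := pvSplitOn_eq f.toList mol.toList hf
  have hnp : parts ≠ [] := by rw [hpv]; exact pvSplit_ne_nil _ _
  have hlen : 1 ≤ parts.length := List.length_pos_iff.mpr hnp
  have hcast : ((parts.length : Int) - 1) = ((parts.length - 1 : Nat) : Int) :=
    (Int.natCast_sub hlen).symm
  rw [hcast, PySem.List.pyRange_zero_nat, List.foldl_map]
  rw [pvAL_eq_B f.toList t.toList mol.toList hf, ← hpv, List.foldl_map]
  apply List.foldl_ext
  intro c k hk
  have h1 : ((k : Int) + 1) = ((k + 1 : Nat) : Int) := by push_cast; ring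
  rw [h1, PySem.List.slice_to parts (by omega), PySem.List.slice_from parts (by omega), Int.toNat_natCast]
  simp [PySem.Chars.join, List.append_assoc]

theorem pvOuter (mol : String) :
    ∀ (rs : List (String × String)) (cand : PySem.Set String), (∀ r ∈ rs, r.2 ≠ "") →
      rs.foldl (fun candidates r =>
        pvALoop r.2 r.1 mol (mol.toList.length + 1) (pvFind r.2 mol 0) candidates) cand
      = rs.foldl (fun candidates r => pvBInner r.1 r.2 mol candidates) cand := by
  intro rs
  induction rs with
  | nil => intro cand h; rfl
  | cons r rs ih =>
    intro cand h
    have hr : r.2 ≠ "" := h r (List.mem_cons_self)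
    have hrl : r.2.toList ≠ [] := by
      intro hc
      apply hr
      have := congrArg String.ofList hc
      simpa using this
    rw [List.foldl_cons, List.foldl_cons]
    have hstep : pvALoop r.2 r.1 mol (mol.toList.length + 1) (pvFind r.2 mol 0) cand
        = pvBInner r.1 r.2 mol cand := by
      have h0 : pvFind r.2 mol 0 = PySem.Str.findFrom mol r.2 (((([] : List Char)).length : Int)) none := by
        rw [pvFind]; simp
      rw [h0, pvALoop_eq r.2 r.1 mol hrl (mol.toList.length + 1) [] mol.toList cand (by simp) (by omega)]
      rw [pvBInner_eq r.1 r.2 mol hrl cand]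
      congr 1
    rw [hstep]
    exact ih _ (fun x hx => h x (List.mem_cons_of_mem r hx))

-- ===== VERDICT (by name: the statement is the Claim_ definition above) =====
theorem get_reverse_replacements_for_str_spec : Claim_equal_get_reverse_replacements_for_str := by
  intro replacements mol hdom hpre
  unfold Spec_get_reverse_replacements_for_str
  unfold get_reverse_replacements_for_str get_reverse_replacements_for_str_alt
  exact pvOuter mol replacements PySem.Set.empty hpre
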